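-- pv_equiv track=rewrite | github.com/pbrito10/industrial-task-recognition | src/tracking/cycle_tracker.py | _matches_order
-- ===== SOURCE A (Python) =====
-- def _matches_order(actual: list[str], expected: list[str]) -> bool:
--     """Verifica se a sequência real respeita a ordem esperada.
--
--     Permite repetições consecutivas da mesma zona (ex: o operador vai três
--     vezes às Rodas antes de avançar) mas não permite saltar zonas nem
--     visitá-las fora de ordem.
--
--     Algoritmo de ponteiro único: ptr aponta para a zona esperada atual.
--     Ao encontrar a zona seguinte, avança o ptr. Qualquer outra zona falha.
--     """
--     if not expected:
--         return True
--     if not actual: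
--         return False
--
--     ptr             = 0
--     entered_current = False
--
--     for zone in actual:
--         if zone == expected[ptr]:
--             entered_current = True
--             continue
--         if entered_current and ptr + 1 < len(expected) and zone == expected[ptr + 1]:
--             ptr            += 1
--             entered_current = True
--             continue
--         return False
--
--     return entered_current and ptr == len(expected) - 1
-- ===== SOURCE B (Python) =====
-- def _matches_order(actual: list[str], expected: list[str]) -> bool:
--     """Collapse consecutive duplicates in actual and compare with expected."""
--     if not expected:
--         return True
--     collapsed = [z for z, prev in zip(actual, [None] + actual) if z != prev]
--     return collapsed == expected
-- ===== Notes on version B (the rewrite author's own statement) =====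
-- stated objective: simpler
-- what changed: Replaces A's single-pointer state machine (ptr + entered_current flag with three branches per element) by collapsing consecutive duplicate zones in actual and comparing the collapsed list to expected.
import Mathlib
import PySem

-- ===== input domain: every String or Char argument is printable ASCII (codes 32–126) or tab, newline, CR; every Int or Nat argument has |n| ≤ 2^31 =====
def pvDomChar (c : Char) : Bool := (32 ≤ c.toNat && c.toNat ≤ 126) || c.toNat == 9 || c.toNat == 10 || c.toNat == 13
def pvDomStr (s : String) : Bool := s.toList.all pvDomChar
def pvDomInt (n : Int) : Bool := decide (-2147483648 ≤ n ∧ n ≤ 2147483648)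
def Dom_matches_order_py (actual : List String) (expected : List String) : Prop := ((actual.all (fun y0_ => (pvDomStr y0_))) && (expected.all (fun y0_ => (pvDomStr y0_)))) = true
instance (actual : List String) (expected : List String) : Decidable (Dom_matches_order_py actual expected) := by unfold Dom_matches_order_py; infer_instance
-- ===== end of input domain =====

-- B replaces A's pointer/flag state machine by collapsing consecutive duplicate
-- zones in `actual` and comparing the collapsed list with `expected` (objective: simpler).

-- ===== PORT A =====
-- state machine of A's for-loop: state = (ptr, entered_current); `false` = early return
def loopA (expected : List String) : List String → Nat → Bool → Bool
  | [], ptr, entered => entered && (ptr == expected.length - 1)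
  | zone :: rest, ptr, entered =>
    if expected[ptr]? = some zone then
      loopA expected rest ptr true
    else if entered && decide (ptr + 1 < expected.length) && decide (expected[ptr + 1]? = some zone) then
      loopA expected rest (ptr + 1) true
    else
      false

def matches_order_py (actual : List String) (expected : List String) : Bool :=
  if expected.isEmpty then true
  else if actual.isEmpty then false
  else loopA expected actual 0 false

-- ===== PORT B =====
def matches_order_py_alt (actual : List String) (expected : List String) : Bool :=
  if expected.isEmpty then true
  else
    -- [z for z, prev in zip(actual, [None] + actual) if z != prev]
    let collapsed :=
      ((actual.zip ((none : Option String) :: actual.map some)).filter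
        (fun zp => some zp.1 != zp.2)).map Prod.fst
    collapsed == expected

-- ===== PRECONDITION & SPEC =====
def Spec_matches_order_py (actual : List String) (expected : List String) (out : Bool) : Prop := out = matches_order_py_alt actual expected
instance (actual : List String) (expected : List String) (out : Bool) : Decidable (Spec_matches_order_py actual expected out) := by unfold Spec_matches_order_py; infer_instance

-- ===== CLAIM (what is proved, stated in full; the proofs are below) =====
def Claim_equal_matches_order_py : Prop := ∀ (actual : List String) (expected : List String), Dom_matches_order_py actual expected → Spec_matches_order_py actual expected (matches_order_py actual expected)

-- ===== LEMMAS AND PROOFS =====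

-- collapse of a run-encoded list relative to the previous element `prev`
def dedupA (prev : String) : List String → List String
  | [] => []
  | z :: zs => if z = prev then dedupA prev zs else z :: dedupA z zs

-- B's zip/filter comprehension computes dedupA
theorem zipFilter_eq_dedupA (l : List String) (a : String) :
    ((l.zip ((some a : Option String) :: l.map some)).filter
        (fun zp => some zp.1 != zp.2)).map Prod.fst = dedupA a l := by
  induction l generalizing a with
  | nil => simp [dedupA]
  | cons z zs ih =>
    by_cases h : z = a <;> simp [dedupA, h, ih]

-- characterisation of A's loop once the first zone has been entered
theorem loopA_char (e : List String) (rest : List String) :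
    ∀ (ptr : Nat) (c : String), ptr < e.length → e[ptr]? = some c →
      loopA e rest ptr true = decide (dedupA c rest = e.drop (ptr + 1)) := by
  induction rest with
  | nil =>
    intro ptr c hlt _
    simp only [loopA, dedupA, Bool.true_and]
    rcases Nat.lt_or_ge (ptr + 1) e.length with h | h
    · have hne : e.drop (ptr + 1) ≠ [] := by
        simp [List.drop_eq_nil_iff]; omega
      have : ptr ≠ e.length - 1 := by omega
      simp [this, Ne.symm hne]
    · have : e.drop (ptr + 1) = [] := by
        rw [List.drop_eq_nil_iff]; omega
      have : ptr = e.length - 1 := by omega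
      simp [this, List.drop_eq_nil_iff]; omega
  | cons z zs ih =>
    intro ptr c hlt hc
    by_cases hz : z = c
    · subst hz
      simp only [loopA, hc]
      rw [ih ptr z hlt hc]
      simp [dedupA]
    · have h1 : ¬ (e[ptr]? = some z) := by
        rw [hc]; simp [Ne.symm hz]
      by_cases h2 : ptr + 1 < e.length ∧ e[ptr + 1]? = some z
      · obtain ⟨h2a, h2b⟩ := h2
        simp only [loopA, if_neg h1, h2a, h2b, decide_true, Bool.and_self, if_true]
        rw [ih (ptr + 1) z h2a h2b]
        have hdrop : e.drop (ptr + 1) = z :: e.drop (ptr + 2) := by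
          rw [List.drop_eq_getElem_cons h2a]
          congr 1
          have := List.getElem?_eq_getElem h2a
          rw [this] at h2b; exact Option.some.inj h2b
        simp [dedupA, hz, hdrop]
      · have hfalse : loopA e (z :: zs) ptr true = false := by
          have hcond : (true && decide (ptr + 1 < e.length) && decide (e[ptr + 1]? = some z)) = false := by
            rcases Classical.em (ptr + 1 < e.length) with hl | hl
            · have hne : ¬ (e[ptr + 1]? = some z) := fun hh => h2 ⟨hl, hh⟩
              simp [hne]
            · simp [hl]
          simp only [loopA, if_neg h1, hcond, Bool.false_eq_true, if_false]
        rw [hfalse]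
        have : dedupA c (z :: zs) = z :: dedupA z zs := by simp [dedupA, hz]
        rw [this]
        rcases Nat.lt_or_ge (ptr + 1) e.length with hl | hl
        · have hne : ¬ (e[ptr + 1]? = some z) := fun hh => h2 ⟨hl, hh⟩
          have hdrop : e.drop (ptr + 1) = e[ptr + 1] :: e.drop (ptr + 2) :=
            List.drop_eq_getElem_cons hl
          have : e[ptr + 1] ≠ z := by
            intro hh
            exact hne (by rw [List.getElem?_eq_getElem hl, hh])
          have hne2 : (z :: dedupA z zs) ≠ (e[ptr + 1] :: e.drop (ptr + 2)) := by
            intro hh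
            exact this (List.cons.inj hh).1.symm
          have hne3 : ¬ (z :: dedupA z zs = e.drop (ptr + 1)) := by
            rw [hdrop]; exact hne2
          simp [hne3]
        · have hnil : e.drop (ptr + 1) = [] := by rw [List.drop_eq_nil_iff]; omega
          rw [hnil]; simp

-- ===== VERDICT (by name: the statement is the Claim_ definition above) =====
theorem matches_order_py_spec : Claim_equal_matches_order_py := by
  intro actual expected _
  unfold Spec_matches_order_py matches_order_py matches_order_py_alt
  cases expected with
  | nil => simp
  | cons h t =>
    simp only [List.isEmpty_cons, Bool.false_eq_true, if_false]
    cases actual with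
    | nil => simp
    | cons a as =>
      simp only [List.isEmpty_cons, Bool.false_eq_true, if_false, List.map_cons, List.zip_cons_cons,
        List.filter_cons]
      have hzf := zipFilter_eq_dedupA as a
      by_cases ha : a = h
      · subst ha
        have hidx : (a :: t)[0]? = some a := rfl
        simp only [loopA, hidx]
        rw [loopA_char (a :: t) as 0 a (by simp) hidx]
        simp only [List.drop_succ_cons, List.drop_zero]
        by_cases hd : dedupA a as = t <;> simp [hzf, hd]
      · have h1 : ¬ ((h :: t)[0]? = some a) := by simp [Ne.symm ha]
        simp only [loopA, if_neg h1, Bool.false_and, Bool.false_eq_true, if_false]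
        simp [hzf, ha]
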